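-- pv_equiv track=rewrite | github.com/thaddadin/aoc2024 | day14/day14.py | mapmove
-- ===== SOURCE A (Python) =====
-- xgrid = 101 # 11
--
-- ygrid = 103 # 7
--
-- def mapmove(robot, nmove):
--
--     xpos  = 0
--     ypos  = 1
--     xvel  = 2
--     yvel  = 3
--     velxy = [robot[xvel], robot[yvel]]
--     locs  = [[0, 0] for ii in range(nmove)]
--     locs[0] = [robot[xpos], robot[ypos]]
--
--     for ii in range(1, nmove):
--
--         currxpos = locs[ii-1][xpos]
--         currypos = locs[ii-1][ypos]
--
--         nextxpos = (currxpos + velxy[xpos]) % xgrid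
--         nextypos = (currypos + velxy[ypos]) % ygrid
--
--         locs[ii] = [nextxpos, nextypos]
--
--     return locs
-- ===== SOURCE B (Python) =====
-- xgrid = 101
-- ygrid = 103
--
-- def mapmove(robot, nmove):
--     x0, y0, vx, vy = robot[0], robot[1], robot[2], robot[3]
--     return [[x0, y0]] + [[(x0 + ii * vx) % xgrid, (y0 + ii * vy) % ygrid]
--                          for ii in range(1, nmove)]
-- ===== Notes on version B (the rewrite author's own statement) =====
-- stated objective: simpler
-- what changed: Replaces the step-by-step recurrence reading locs[ii-1] with a direct closed-form position (x0+ii*vx)%xgrid, (y0+ii*vy)%ygrid computed independently per index, built as one list comprehension after the raw index-0 entry.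
import Mathlib
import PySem

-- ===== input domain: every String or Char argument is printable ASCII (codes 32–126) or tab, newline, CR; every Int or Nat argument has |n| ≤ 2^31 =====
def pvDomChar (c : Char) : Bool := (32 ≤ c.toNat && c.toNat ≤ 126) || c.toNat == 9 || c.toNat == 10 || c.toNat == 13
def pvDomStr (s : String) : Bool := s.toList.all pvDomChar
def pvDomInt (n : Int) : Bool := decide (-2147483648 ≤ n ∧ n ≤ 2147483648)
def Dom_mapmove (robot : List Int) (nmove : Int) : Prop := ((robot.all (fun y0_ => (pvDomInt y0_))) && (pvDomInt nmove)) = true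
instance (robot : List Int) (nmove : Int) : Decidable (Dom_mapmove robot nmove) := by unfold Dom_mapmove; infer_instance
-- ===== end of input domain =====

-- B replaces A's step-by-step recurrence (each position from the previous one) with an
-- independent closed-form position per index; objective: simpler (one comprehension, no mutation).

-- ===== PORT A =====
def mapmove (robot : List Int) (nmove : Int) : List (List Int) :=
  let velxy : List Int := [PySem.List.pyGetD robot 2 0, PySem.List.pyGetD robot 3 0]
  let locs : List (List Int) := (PySem.List.pyRange 0 nmove 1).map (fun _ => [0, 0])
  let locs := PySem.List.pySetD locs 0 [PySem.List.pyGetD robot 0 0, PySem.List.pyGetD robot 1 0]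
  (PySem.List.pyRange 1 nmove 1).foldl (fun locs ii =>
    let currxpos := PySem.List.pyGetD (PySem.List.pyGetD locs (ii - 1) []) 0 0
    let currypos := PySem.List.pyGetD (PySem.List.pyGetD locs (ii - 1) []) 1 0
    let nextxpos := PySem.Int.mod (currxpos + PySem.List.pyGetD velxy 0 0) 101
    let nextypos := PySem.Int.mod (currypos + PySem.List.pyGetD velxy 1 0) 103
    PySem.List.pySetD locs ii [nextxpos, nextypos]) locs

-- ===== PORT B =====
def mapmove_alt (robot : List Int) (nmove : Int) : List (List Int) :=
  let x0 := PySem.List.pyGetD robot 0 0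
  let y0 := PySem.List.pyGetD robot 1 0
  let vx := PySem.List.pyGetD robot 2 0
  let vy := PySem.List.pyGetD robot 3 0
  [[x0, y0]] ++ (PySem.List.pyRange 1 nmove 1).map (fun ii =>
    [PySem.Int.mod (x0 + ii * vx) 101, PySem.Int.mod (y0 + ii * vy) 103])

-- ===== PRECONDITION & SPEC =====
-- A raises IndexError when robot has fewer than 4 entries (robot[3]) or when nmove <= 0
-- (locs[0] = ... on an empty list); exactly those inputs are excluded.
def Pre_mapmove (robot : List Int) (nmove : Int) : Prop := 4 ≤ robot.length ∧ 1 ≤ nmove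
instance (robot : List Int) (nmove : Int) : Decidable (Pre_mapmove robot nmove) := by unfold Pre_mapmove; infer_instance
def pvWitness_mapmove : List Int × Int := ([2, 3, 5, 7], 4)

def Spec_mapmove (robot : List Int) (nmove : Int) (out : List (List Int)) : Prop := out = mapmove_alt robot nmove
instance (robot : List Int) (nmove : Int) (out : List (List Int)) : Decidable (Spec_mapmove robot nmove out) := by unfold Spec_mapmove; infer_instance

-- ===== CLAIM (what is proved, stated in full; the proofs are below) =====
def Claim_equal_mapmove : Prop := ∀ (robot : List Int) (nmove : Int), Dom_mapmove robot nmove → Pre_mapmove robot nmove → Spec_mapmove robot nmove (mapmove robot nmove)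

-- ===== LEMMAS AND PROOFS =====

-- the closed-form position after ii steps (B's comprehension body)
def pvF (x0 y0 vx vy : Int) (ii : Int) : List Int :=
  [PySem.Int.mod (x0 + ii * vx) 101, PySem.Int.mod (y0 + ii * vy) 103]

lemma pvRange_eq (k : Nat) :
    PySem.List.pyRange 1 (1 + (k : Int)) 1 = (List.range k).map (fun (j : Nat) => ((j : Int) + 1)) := by
  induction k with
  | zero => decide
  | succ m ih =>
      have h : (1 : Int) ≤ 1 + (m : Int) := by omega
      have : (1 : Int) + ((m + 1 : Nat) : Int) = (1 + (m : Int)) + 1 := by omega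
      rw [this, PySem.List.pyRange_one_succ_right h, ih, List.range_succ]
      simp
      ring

lemma pvMod_step (a v : Int) (ii : Int) (m : Int) (hm : 0 < m) :
    PySem.Int.mod (PySem.Int.mod (a + ii * v) m + v) m = PySem.Int.mod (a + (ii + 1) * v) m := by
  rw [PySem.Int.mod_eq_emod_of_pos hm, PySem.Int.mod_eq_emod_of_pos hm,
      PySem.Int.mod_eq_emod_of_pos hm, Int.emod_add_emod]
  ring_nf

-- loop invariant for A: after processing 1..k, locs holds the closed-form prefix then untouched zeros
lemma pvLoop (x0 y0 vx vy : Int) (n : Nat) (hn : 1 ≤ n) (k : Nat) (hk : k ≤ n - 1) :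
    ((List.range k).map (fun (j : Nat) => ((j : Int) + 1))).foldl
      (fun locs ii =>
        let currxpos := PySem.List.pyGetD (PySem.List.pyGetD locs (ii - 1) []) 0 0
        let currypos := PySem.List.pyGetD (PySem.List.pyGetD locs (ii - 1) []) 1 0
        let nextxpos := PySem.Int.mod (currxpos + PySem.List.pyGetD [vx, vy] 0 0) 101
        let nextypos := PySem.Int.mod (currypos + PySem.List.pyGetD [vx, vy] 1 0) 103
        PySem.List.pySetD locs ii [nextxpos, nextypos])
      ([x0, y0] :: List.replicate (n - 1) [0, 0])
    = ([x0, y0] :: (List.range k).map (fun (j : Nat) => pvF x0 y0 vx vy ((j : Int) + 1)))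
      ++ List.replicate (n - 1 - k) [0, 0] := by
  induction k with
  | zero => simp
  | succ m ih =>
      have hm : m ≤ n - 1 := by omega
      rw [List.range_succ, List.map_append, List.map_append, List.foldl_append, ih hm]
      simp only [List.map_cons, List.map_nil, List.foldl_cons, List.foldl_nil]
      simp only [show PySem.List.pyGetD [vx, vy] 0 0 = vx from rfl,
                 show PySem.List.pyGetD [vx, vy] 1 0 = vy from rfl]
      have hsub : ((m : Int) + 1) - 1 = ((m : Nat) : Int) := by omega
      rw [hsub, PySem.List.pyGetD_natCast]
      have hlenA : ([x0, y0] :: (List.range m).map (fun (j : Nat) => pvF x0 y0 vx vy ((j : Int) + 1))).length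
          = m + 1 := by simp
      have hget : (([x0, y0] :: (List.range m).map (fun (j : Nat) => pvF x0 y0 vx vy ((j : Int) + 1)))
          ++ List.replicate (n - 1 - m) [0, 0]).getD m []
          = (if m = 0 then [x0, y0] else pvF x0 y0 vx vy (m : Int)) := by
        rw [List.getD, List.getElem?_append_left (by omega)]
        cases m with
        | zero => simp
        | succ p => simp [pvF]
      rw [hget]
      have hset : PySem.List.pySetD
          ((([x0, y0] :: (List.range m).map (fun (j : Nat) => pvF x0 y0 vx vy ((j : Int) + 1)))
            ++ List.replicate (n - 1 - m) [0, 0])) ((m : Int) + 1)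
          [PySem.Int.mod
              ((if m = 0 then [x0, y0] else pvF x0 y0 vx vy (m : Int)).getD 0 0 + vx) 101,
           PySem.Int.mod
              ((if m = 0 then [x0, y0] else pvF x0 y0 vx vy (m : Int)).getD 1 0 + vy) 103]
          = ([x0, y0] :: (List.range m).map (fun (j : Nat) => pvF x0 y0 vx vy ((j : Int) + 1)))
            ++ ([PySem.Int.mod
                  ((if m = 0 then [x0, y0] else pvF x0 y0 vx vy (m : Int)).getD 0 0 + vx) 101,
                PySem.Int.mod
                  ((if m = 0 then [x0, y0] else pvF x0 y0 vx vy (m : Int)).getD 1 0 + vy) 103]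
               :: List.replicate (n - 1 - (m + 1)) [0, 0]) := by
        rw [PySem.List.pySetD_of_nonneg _ _ (by omega)]
        have h1 : ((m : Int) + 1).toNat = m + 1 := by omega
        rw [h1, List.set_append]
        have h2 : n - 1 - m = (n - 1 - (m + 1)) + 1 := by omega
        rw [if_neg (by simp), h2, List.replicate_succ]
        simp
      simp only [PySem.List.pyGetD_ofNat'] at *
      rw [hset]
      have hnextEq : [PySem.Int.mod ((if m = 0 then [x0, y0] else pvF x0 y0 vx vy (m : Int)).getD 0 0 + vx) 101,
            PySem.Int.mod ((if m = 0 then [x0, y0] else pvF x0 y0 vx vy (m : Int)).getD 1 0 + vy) 103]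
          = pvF x0 y0 vx vy ((m : Int) + 1) := by
        cases m with
        | zero => simp [pvF]
        | succ p =>
            have h1 := pvMod_step x0 vx ((p : Int) + 1) 101 (by norm_num)
            have h2 := pvMod_step y0 vy ((p : Int) + 1) 103 (by norm_num)
            simp only [if_neg (Nat.succ_ne_zero p), pvF, List.getD_cons_zero, List.getD_cons_succ]
            push_cast
            rw [h1, h2]
      rw [hnextEq]
      simp

theorem mapmove_spec : Claim_equal_mapmove := by
  intro robot nmove _ hpre
  obtain ⟨hlen, hn⟩ := hpre
  unfold Spec_mapmove mapmove mapmove_alt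
  set x0 := PySem.List.pyGetD robot 0 0
  set y0 := PySem.List.pyGetD robot 1 0
  set vx := PySem.List.pyGetD robot 2 0
  set vy := PySem.List.pyGetD robot 3 0
  obtain ⟨n, rfl⟩ : ∃ n : Nat, nmove = (n : Int) := ⟨nmove.toNat, by omega⟩
  have hn1 : 1 ≤ n := by omega
  have hinit : PySem.List.pySetD ((PySem.List.pyRange 0 (n : Int) 1).map (fun _ => ([0, 0] : List Int))) 0 [x0, y0]
      = [x0, y0] :: List.replicate (n - 1) [0, 0] := by
    rw [PySem.List.pySetD_of_nonneg _ _ (by omega)]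
    have : (PySem.List.pyRange 0 (n : Int) 1).map (fun _ => ([0, 0] : List Int))
        = List.replicate n [0, 0] := by
      rw [PySem.List.pyRange_zero_natCast, List.map_map]
      simp only [Function.comp_def, List.map_const', List.length_range]
    rw [this]
    obtain ⟨p, rfl⟩ : ∃ p, n = p + 1 := ⟨n - 1, by omega⟩
    simp [List.replicate_succ]
  have hrange : PySem.List.pyRange 1 (n : Int) 1
      = (List.range (n - 1)).map (fun (j : Nat) => ((j : Int) + 1)) := by
    have h : (1 : Int) + ((n - 1 : Nat) : Int) = (n : Int) := by omega
    rw [← h, pvRange_eq]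
  simp only [hinit, hrange]
  rw [pvLoop x0 y0 vx vy n hn1 (n - 1) le_rfl]
  simp [pvF, List.map_map, Function.comp]
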